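-- pv_equiv track=rewrite | github.com/marteeggen/Attention-based-XAI-for-transformers | shapley/methods/attn_shapley/utils.py | create_cf_dict
-- ===== SOURCE A (Python) =====
-- from itertools import combinations
--
-- def create_cf_dict(characteritic_values, num_players):
--     """
--     Create a dictionary from a list with all possible combinations of indices as keys and the sum of the corresponding elements in the input list as values.
--     """
--     cf_dict = {(): 0}
--
--     indices = range(1, num_players + 1)
--
--     for r in range(1, num_players + 1):
--         for combo in combinations(indices, r):
--             value = sum(characteritic_values[i - 1] for i in combo)
--             cf_dict[combo] = value
--
--     return cf_dict
-- ===== SOURCE B (Python) =====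
-- def create_cf_dict(characteritic_values, num_players):
--     """
--     Create a dictionary from a list with all possible combinations of indices as keys and the sum of the corresponding elements in the input list as values.
--     """
--     pairs = [(i, characteritic_values[i - 1]) for i in range(1, num_players + 1)]
--
--     def subsets(pairs, r, combo, s):
--         # all r-subsets of `pairs` in lexicographic order, each paired with its running sum
--         if r == 0:
--             return [(combo, s)]
--         if not pairs:
--             return []
--         (i, v), rest = pairs[0], pairs[1:]
--         return subsets(rest, r - 1, combo + (i,), s + v) + subsets(rest, r, combo, s)
--
--     items = [((), 0)]
--     for r in range(1, num_players + 1):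
--         items.extend(subsets(pairs, r, (), 0))
--     return dict(items)
-- ===== Notes on version B (the rewrite author's own statement) =====
-- stated objective: alternative
-- what changed: Replaces itertools.combinations plus a fresh O(r) sum per combination by a single include/exclude recursion over (index, value) pairs that carries the running sum, producing the same size-then-lexicographic key order.
import Mathlib
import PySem

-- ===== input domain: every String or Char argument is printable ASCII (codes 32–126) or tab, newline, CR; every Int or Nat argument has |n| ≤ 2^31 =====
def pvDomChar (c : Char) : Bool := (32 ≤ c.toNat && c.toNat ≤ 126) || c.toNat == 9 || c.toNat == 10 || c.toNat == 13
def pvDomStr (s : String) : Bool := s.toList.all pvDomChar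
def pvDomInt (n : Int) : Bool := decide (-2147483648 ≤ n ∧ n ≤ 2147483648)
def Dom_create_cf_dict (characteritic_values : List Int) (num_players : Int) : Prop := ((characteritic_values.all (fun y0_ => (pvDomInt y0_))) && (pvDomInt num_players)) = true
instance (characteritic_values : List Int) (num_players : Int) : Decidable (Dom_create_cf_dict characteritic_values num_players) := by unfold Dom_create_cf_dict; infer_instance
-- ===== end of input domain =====

-- B replaces itertools.combinations + a fresh sum per combination by one include/exclude
-- recursion that carries a running sum (objective: alternative algorithm, same order of output).

-- ===== PORT A =====
def create_cf_dict (characteritic_values : List Int) (num_players : Int) : List (List Int × Int) :=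
  let cf_dict : PySem.Dict (List Int) Int := PySem.Dict.mk [([], 0)]   -- {(): 0}
  let indices := PySem.List.pyRange 1 (num_players + 1)
  ((PySem.List.pyRange 1 (num_players + 1)).foldl
    (fun d r =>
      (PySem.List.combinations indices r.toNat).foldl
        (fun d combo =>
          d.insert combo
            ((combo.map (fun i => PySem.List.pyGetD characteritic_values (i - 1) 0)).sum))
        d)
    cf_dict).items

-- ===== PORT B =====
-- all r-subsets of `pairs` in lexicographic order, each paired with its running sum
def cfSubsets : List (Int × Int) → Nat → List Int → Int → List (List Int × Int)
  | _, 0, combo, s => [(combo, s)]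
  | [], _ + 1, _, _ => []
  | (i, v) :: rest, r + 1, combo, s =>
      cfSubsets rest r (combo ++ [i]) (s + v) ++ cfSubsets rest (r + 1) combo s

def create_cf_dict_alt (characteritic_values : List Int) (num_players : Int) : List (List Int × Int) :=
  let pairs := (PySem.List.pyRange 1 (num_players + 1)).map
      (fun i => (i, PySem.List.pyGetD characteritic_values (i - 1) 0))
  let items := (PySem.List.pyRange 1 (num_players + 1)).foldl
      (fun acc r => acc ++ cfSubsets pairs r.toNat [] 0) [([], 0)]
  (PySem.Dict.ofList items).items

-- ===== PRECONDITION & SPEC =====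
-- Pre_ excludes exactly the inputs where Python A raises IndexError
-- (num_players exceeding the list length); both programs raise there.
def Pre_create_cf_dict (characteritic_values : List Int) (num_players : Int) : Prop :=
  num_players ≤ (characteritic_values.length : Int)
instance (characteritic_values : List Int) (num_players : Int) : Decidable (Pre_create_cf_dict characteritic_values num_players) := by unfold Pre_create_cf_dict; infer_instance

def pvWitness_create_cf_dict : List Int × Int := ([2, -3, 5], 3)

def Spec_create_cf_dict (characteritic_values : List Int) (num_players : Int) (out : List (List Int × Int)) : Prop := out = create_cf_dict_alt characteritic_values num_players
instance (characteritic_values : List Int) (num_players : Int) (out : List (List Int × Int)) : Decidable (Spec_create_cf_dict characteritic_values num_players out) := by unfold Spec_create_cf_dict; infer_instance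

-- ===== CLAIM (what is proved, stated in full; the proofs are below) =====
def Claim_equal_create_cf_dict : Prop := ∀ (characteritic_values : List Int) (num_players : Int), Dom_create_cf_dict characteritic_values num_players → Pre_create_cf_dict characteritic_values num_players → Spec_create_cf_dict characteritic_values num_players (create_cf_dict characteritic_values num_players)

-- ===== LEMMAS AND PROOFS =====

-- combinations of a duplicate-free list are pairwise distinct
theorem nodup_combinations {α : Type} (xs : List α) (r : Nat) (h : xs.Nodup) :
    (PySem.List.combinations xs r).Nodup := by
  induction xs generalizing r with
  | nil =>
    cases r with
    | zero => simp [PySem.List.combinations_zero]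
    | succ r => simp [PySem.List.combinations_nil_succ]
  | cons x xs ih =>
    cases r with
    | zero => simp [PySem.List.combinations_zero]
    | succ r =>
      rw [PySem.List.combinations_cons_succ]
      have hx : x ∉ xs := (List.nodup_cons.mp h).1
      have hxs : xs.Nodup := (List.nodup_cons.mp h).2
      refine List.Nodup.append ?_ (ih _ hxs) ?_
      · exact (ih _ hxs).map (fun a b hab => by simpa using hab)
      · intro c hc hc'
        rcases List.mem_map.mp hc with ⟨c', _, rfl⟩
        have hsub := PySem.List.sublist_of_mem_combinations hc'
        exact hx (hsub.subset (List.mem_cons_self))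

-- B's recursion computed in closed form over combinations
theorem cfSubsets_eq (ps : List (Int × Int)) (r : Nat) (combo : List Int) (s : Int) :
    cfSubsets ps r combo s =
      (PySem.List.combinations ps r).map
        (fun cs => (combo ++ cs.map Prod.fst, s + (cs.map Prod.snd).sum)) := by
  induction ps generalizing r combo s with
  | nil =>
    cases r with
    | zero => simp [cfSubsets, PySem.List.combinations_zero]
    | succ r => simp [cfSubsets, PySem.List.combinations_nil_succ]
  | cons p rest ih =>
    cases r with
    | zero => simp [cfSubsets, PySem.List.combinations_zero]
    | succ r =>
      obtain ⟨i, v⟩ := p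
      rw [PySem.List.combinations_cons_succ]
      simp only [cfSubsets, ih, List.map_append, List.map_map]
      congr 1
      apply List.map_congr_left
      intro cs _
      simp [add_assoc]

-- A's nested insert loops append one batch per subset size (keys are fresh throughout)
theorem A_fold (idx : List Int) (val : List Int → Int) (rs : List Int)
    (d : PySem.Dict (List Int) Int)
    (hd : d.keys.Nodup) (hidx : idx.Nodup)
    (hrs : rs.Pairwise (· < ·)) (hpos : ∀ r ∈ rs, 1 ≤ r)
    (hlen : ∀ k ∈ d.keys, ∀ r ∈ rs, k.length < r.toNat) :
    (rs.foldl
        (fun d r =>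
          (PySem.List.combinations idx r.toNat).foldl (fun d c => d.insert c (val c)) d)
        d).items
      = d.items ++ rs.flatMap
          (fun r => (PySem.List.combinations idx r.toNat).map (fun c => (c, val c))) := by
  induction rs generalizing d with
  | nil => simp
  | cons r rs ih =>
    have hfresh : ∀ c ∈ PySem.List.combinations idx r.toNat, d.contains c = false := by
      intro c hc
      by_contra hcon
      have : d.contains c = true := by
        cases hcc : d.contains c with
        | false => exact absurd hcc hcon
        | true => rfl
      have hmem := (PySem.Dict.contains_iff_mem_keys d c).mp this
      have := hlen c hmem r (List.mem_cons_self)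
      have := PySem.List.length_of_mem_combinations hc
      omega
    have hnodupb : ((PySem.List.combinations idx r.toNat).map id).Nodup := by
      simpa using nodup_combinations idx r.toNat hidx
    have hinner := PySem.Dict.items_foldl_insert_fresh
      (PySem.List.combinations idx r.toNat) id val d hfresh hnodupb
    simp only [id] at hinner
    set d' := (PySem.List.combinations idx r.toNat).foldl (fun d c => d.insert c (val c)) d
      with hd'def
    have hitems' : d'.items = d.items ++
        (PySem.List.combinations idx r.toNat).map (fun c => (c, val c)) := hinner
    have hkeys' : d'.keys = d.keys ++ (PySem.List.combinations idx r.toNat) := by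
      simp only [PySem.Dict.keys, hitems', List.map_append]
      congr 1
      simp [Function.comp_def]
    have hd'nodup : d'.keys.Nodup :=
      PySem.Dict.nodup_keys_foldl_insert _ (fun _ c => val c) d hd
    have hlen' : ∀ k ∈ d'.keys, ∀ r' ∈ rs, k.length < r'.toNat := by
      intro k hk r' hr'
      rw [hkeys', List.mem_append] at hk
      rcases hk with hk | hk
      · exact hlen k hk r' (List.mem_cons_of_mem _ hr')
      · have h1 := PySem.List.length_of_mem_combinations hk
        have h2 : r < r' := (List.pairwise_cons.mp hrs).1 r' hr'
        have h3 : 1 ≤ r := hpos r (List.mem_cons_self)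
        omega
    have := ih d' hd'nodup ((List.pairwise_cons.mp hrs).2)
      (fun r' hr' => hpos r' (List.mem_cons_of_mem _ hr')) hlen'
    simp only [List.foldl_cons, List.flatMap_cons]
    rw [← hd'def, this, hitems', List.append_assoc]

-- the keys produced (the empty set, then every r-subset of a duplicate-free index list)
-- are pairwise distinct
theorem keys_nodup (idx : List Int) (rs : List Int) (hidx : idx.Nodup)
    (hrs : rs.Pairwise (· < ·)) (hpos : ∀ r ∈ rs, 1 ≤ r) :
    ([] :: rs.flatMap (fun r => PySem.List.combinations idx r.toNat)).Nodup := by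
  rw [List.nodup_cons]
  constructor
  · intro hmem
    rcases List.mem_flatMap.mp hmem with ⟨r, hr, hc⟩
    have h1 := PySem.List.length_of_mem_combinations hc
    have h2 := hpos r hr
    simp at h1
    omega
  · induction rs with
    | nil => simp
    | cons r rs ih =>
      rw [List.flatMap_cons]
      refine List.Nodup.append (nodup_combinations idx r.toNat hidx)
        (ih ((List.pairwise_cons.mp hrs).2)
          (fun r' hr' => hpos r' (List.mem_cons_of_mem _ hr'))) ?_
      intro c hc hc'
      rcases List.mem_flatMap.mp hc' with ⟨r', hr', hc''⟩
      have h1 := PySem.List.length_of_mem_combinations hc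
      have h2 := PySem.List.length_of_mem_combinations hc''
      have h3 : r < r' := (List.pairwise_cons.mp hrs).1 r' hr'
      have h4 : 1 ≤ r := hpos r (List.mem_cons_self)
      omega

-- closed forms of the two ports
theorem A_eq (cv : List Int) (n : Int) :
    create_cf_dict cv n
      = ([], 0) :: (PySem.List.pyRange 1 (n + 1)).flatMap
          (fun r => (PySem.List.combinations (PySem.List.pyRange 1 (n + 1)) r.toNat).map
            (fun c => (c, (c.map (fun i => PySem.List.pyGetD cv (i - 1) 0)).sum))) := by
  unfold create_cf_dict
  show (List.foldl _ (PySem.Dict.mk [([], 0)]) (PySem.List.pyRange 1 (n + 1))).items = _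
  rw [A_fold (PySem.List.pyRange 1 (n + 1))
        (fun c => (c.map (fun i => PySem.List.pyGetD cv (i - 1) 0)).sum)
        (PySem.List.pyRange 1 (n + 1)) (PySem.Dict.mk [([], 0)])
        (by simp) (PySem.List.nodup_pyRange_one 1 (n + 1))
        (PySem.List.pairwise_lt_pyRange_one 1 (n + 1))
        (fun r hr => (PySem.List.mem_pyRange_one.mp hr).1)
        (by intro k hk r hr
            simp only [PySem.Dict.keys] at hk
            simp at hk
            subst hk
            have := (PySem.List.mem_pyRange_one.mp hr).1
            simp only [List.length_nil]
            omega)]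
  simp

theorem B_eq (cv : List Int) (n : Int) :
    create_cf_dict_alt cv n
      = ([], 0) :: (PySem.List.pyRange 1 (n + 1)).flatMap
          (fun r => (PySem.List.combinations (PySem.List.pyRange 1 (n + 1)) r.toNat).map
            (fun c => (c, (c.map (fun i => PySem.List.pyGetD cv (i - 1) 0)).sum))) := by
  unfold create_cf_dict_alt
  show (PySem.Dict.ofList
      ((PySem.List.pyRange 1 (n + 1)).foldl
        (fun acc r => acc ++ cfSubsets
          ((PySem.List.pyRange 1 (n + 1)).map
            (fun i => (i, PySem.List.pyGetD cv (i - 1) 0))) r.toNat [] 0)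
        [([], 0)])).items = _
  rw [PySem.List.foldl_append_eq_flatMap]
  have hsub : ∀ r : Nat,
      cfSubsets ((PySem.List.pyRange 1 (n + 1)).map
        (fun i => (i, PySem.List.pyGetD cv (i - 1) 0))) r [] 0
      = (PySem.List.combinations (PySem.List.pyRange 1 (n + 1)) r).map
          (fun c => (c, (c.map (fun i => PySem.List.pyGetD cv (i - 1) 0)).sum)) := by
    intro r
    rw [cfSubsets_eq, PySem.List.combinations_map]
    simp [List.map_map, Function.comp_def]
  simp only [hsub, List.singleton_append]
  have hknd : ((((([] : List Int), (0 : Int)) :: (PySem.List.pyRange 1 (n + 1)).flatMap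
        (fun r => (PySem.List.combinations (PySem.List.pyRange 1 (n + 1)) r.toNat).map
          (fun c => (c, (c.map (fun i => PySem.List.pyGetD cv (i - 1) 0)).sum))))).map
        Prod.fst).Nodup := by
    have := keys_nodup (PySem.List.pyRange 1 (n + 1)) (PySem.List.pyRange 1 (n + 1))
      (PySem.List.nodup_pyRange_one 1 (n + 1))
      (PySem.List.pairwise_lt_pyRange_one 1 (n + 1))
      (fun r hr => (PySem.List.mem_pyRange_one.mp hr).1)
    simpa [List.map_flatMap, List.map_map, Function.comp_def] using this
  have := PySem.Dict.items_foldl_insert_fresh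
    (((([] : List Int), (0 : Int)) :: (PySem.List.pyRange 1 (n + 1)).flatMap
        (fun r => (PySem.List.combinations (PySem.List.pyRange 1 (n + 1)) r.toNat).map
          (fun c => (c, (c.map (fun i => PySem.List.pyGetD cv (i - 1) 0)).sum)))))
    Prod.fst Prod.snd PySem.Dict.empty (by intro a _; simp) hknd
  simpa [PySem.Dict.ofList, PySem.Dict.update] using this

-- ===== VERDICT (by name: the statement is the Claim_ definition above) =====
theorem create_cf_dict_spec : Claim_equal_create_cf_dict := by
  intro cv n _ _
  unfold Spec_create_cf_dict
  rw [A_eq cv n, B_eq cv n]
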